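-- pv_equiv track=rewrite | github.com/jecki/DHParser | examples/LaTeX/testdata/Promotion/latex2html.py | readableBibKey
-- ===== SOURCE A (Python) =====
-- def readableBibKey(key):
--     s = [ch for ch in key]
--     s[0] = s[0].upper()
--     for i in range(1, len(s)):
--         if s[i - 1] == "-" and "".join(s[i:i + 6]).lower() != "et-al:" and \
--            "".join(s[i:i + 3]).lower() != "al:":
--             s[i - 1] = "/"
--         if s[i - 1] == " " or s[i - 1] == "," or s[i - 1] == "/":
--             s[i] = s[i].upper()
--     return "".join(s)
-- ===== SOURCE B (Python) =====
-- def _converted(key, j):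
--     # the char at j after dash conversion, computed from the original string only
--     if key[j] == '-' and j + 1 < len(key):
--         low = key.lower()
--         if low[j + 1:j + 7] != 'et-al:' and low[j + 1:j + 4] != 'al:':
--             return '/'
--     return key[j]
--
--
-- def readableBibKey(key):
--     return ''.join(
--         _converted(key, j).upper()
--         if j == 0 or _converted(key, j - 1) in ' ,/'
--         else _converted(key, j)
--         for j in range(len(key)))
-- ===== Notes on version B (the rewrite author's own statement) =====
-- stated objective: alternative
-- what changed: A's in-place mutation loop over a char list is replaced by a pure closed form: the output is built in one comprehension where each position's char is computed independently from the ORIGINAL string (dash-to-'/' decided by a lowercased lookahead, uppercasing decided by the converted predecessor char); no list is mutated and no sequential state is carried.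
import Mathlib
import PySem

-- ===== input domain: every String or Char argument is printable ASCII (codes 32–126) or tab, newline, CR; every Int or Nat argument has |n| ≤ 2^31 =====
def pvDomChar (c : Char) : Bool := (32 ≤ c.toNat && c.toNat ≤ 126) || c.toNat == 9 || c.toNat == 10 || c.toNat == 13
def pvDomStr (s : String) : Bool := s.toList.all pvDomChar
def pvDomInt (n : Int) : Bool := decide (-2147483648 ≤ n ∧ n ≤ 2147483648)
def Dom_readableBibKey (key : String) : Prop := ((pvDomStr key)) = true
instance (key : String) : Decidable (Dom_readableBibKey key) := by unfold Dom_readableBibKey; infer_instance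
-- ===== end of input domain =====

-- B replaces A's in-place mutation loop by a pure per-index closed form over the original string;
-- same return value, no speed claim.

-- ===== PORT A =====
-- Python's one-char str.upper()/.lower() is Char.toUpper/Char.toLower (exact on printable ASCII);
-- "".join(s[i:i+6]).lower() != "et-al:" is ported as a List Char comparison.
def rbkStepA (s : List Char) (i : Nat) : List Char :=
  let s :=
    if (s.getD (i - 1) ' ' == '-')
        && !(((s.drop i).take 6).map Char.toLower == "et-al:".toList)
        && !(((s.drop i).take 3).map Char.toLower == "al:".toList) then
      s.set (i - 1) '/'
    else s
  if (s.getD (i - 1) ' ' == ' ') || (s.getD (i - 1) ' ' == ',') || (s.getD (i - 1) ' ' == '/') then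
    s.set i ((s.getD i ' ').toUpper)
  else s

def readableBibKey (key : String) : String :=
  match key.toList with
  | [] => ""  -- Python raises IndexError on s[0] here; excluded by Pre_readableBibKey
  | c :: rest =>
    let s := c.toUpper :: rest
    String.mk ((List.range' 1 (s.length - 1)).foldl rbkStepA s)

-- ===== PORT B =====
-- _converted(key, j): the char at j after dash conversion, from the original string only
def rbkConv (a : List Char) (j : Nat) : Char :=
  if (a.getD j ' ' == '-') && decide (j + 1 < a.length) then
    let low := a.map Char.toLower
    if !((low.drop (j + 1)).take 6 == "et-al:".toList)
        && !((low.drop (j + 1)).take 3 == "al:".toList) then '/'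
    else a.getD j ' '
  else a.getD j ' '

def readableBibKey_alt (key : String) : String :=
  let a := key.toList
  String.mk ((List.range a.length).map (fun j =>
    if (j == 0) || (rbkConv a (j - 1) == ' ') || (rbkConv a (j - 1) == ',')
        || (rbkConv a (j - 1) == '/') then
      (rbkConv a j).toUpper
    else rbkConv a j))

-- ===== PRECONDITION & SPEC =====
-- Pre_ excludes only the empty string, on which the Python A raises IndexError at s[0].
def Pre_readableBibKey (key : String) : Prop := key ≠ ""
instance (key : String) : Decidable (Pre_readableBibKey key) := by unfold Pre_readableBibKey; infer_instance
def pvWitness_readableBibKey : String := "mueller-thomas:2001"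

def Spec_readableBibKey (key : String) (out : String) : Prop := out = readableBibKey_alt key
instance (key : String) (out : String) : Decidable (Spec_readableBibKey key out) := by unfold Spec_readableBibKey; infer_instance

-- ===== CLAIM (what is proved, stated in full; the proofs are below) =====
def Claim_equal_readableBibKey : Prop := ∀ (key : String), Dom_readableBibKey key → Pre_readableBibKey key → Spec_readableBibKey key (readableBibKey key)
-- ===== LEMMAS AND PROOFS =====

-- the separator test of the capitalization branch
def rbkSep (c : Char) : Bool := (c == ' ') || (c == ',') || (c == '/')

-- does position j of the original char list get turned into '/'?
def dcond (a : List Char) (j : Nat) : Bool :=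
  (a.getD j ' ' == '-') && decide (j + 1 < a.length)
    && !(((a.drop (j + 1)).take 6).map Char.toLower == "et-al:".toList)
    && !(((a.drop (j + 1)).take 3).map Char.toLower == "al:".toList)

-- char at j after the dash pass
def dch (a : List Char) (j : Nat) : Char := if dcond a j then '/' else a.getD j ' '

-- char at j in A's state after iteration j (uppercased, dash replacement still pending)
def ech (a : List Char) (j : Nat) : Char :=
  if j = 0 then (a.getD 0 ' ').toUpper
  else if rbkSep (dch a (j - 1)) then (a.getD j ' ').toUpper else a.getD j ' '

-- final char at position j
def fch (a : List Char) (j : Nat) : Char :=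
  if j = 0 then (dch a 0).toUpper
  else if rbkSep (dch a (j - 1)) then (dch a j).toUpper else dch a j

-- ---- small list helpers ----
lemma getD_len {α : Type} (xs : List α) (y : α) (zs : List α) (d : α) :
    (xs ++ y :: zs).getD xs.length d = y := by
  induction xs with
  | nil => rfl
  | cons x xs ih => simpa using ih

lemma set_len {α : Type} (xs : List α) (y v : α) (zs : List α) :
    (xs ++ y :: zs).set xs.length v = xs ++ v :: zs := by
  induction xs with
  | nil => rfl
  | cons x xs ih => simpa using ih

lemma drop_len_succ {α : Type} (xs : List α) (y : α) (zs : List α) :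
    (xs ++ y :: zs).drop (xs.length + 1) = zs := by
  induction xs with
  | nil => rfl
  | cons x xs ih => simpa using ih

lemma drop_cons_getD (a : List Char) (k : Nat) (h : k < a.length) :
    a.drop k = a.getD k ' ' :: a.drop (k + 1) := by
  rw [List.drop_eq_getElem_cons h, List.getD_eq_getElem a ' ' h]

-- ---- char lemmas (on the printable-ASCII domain) ----
lemma dom_bound (c : Char) (h : pvDomChar c = true) : c.toNat < 127 := by
  unfold pvDomChar at h
  simp only [Bool.or_eq_true, Bool.and_eq_true, decide_eq_true_eq, beq_iff_eq] at h
  omega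

lemma char_up_dash (c : Char) (h : pvDomChar c = true) : (c.toUpper == '-') = (c == '-') := by
  have hb := dom_bound c h
  have key : ∀ n : Fin 127, ((Char.ofNat n.1).toUpper == '-') = ((Char.ofNat n.1) == '-') := by decide
  have := key ⟨c.toNat, hb⟩
  simpa [Char.ofNat_toNat] using this

lemma char_up_sep (c : Char) (h : pvDomChar c = true) : rbkSep c.toUpper = rbkSep c := by
  have hb := dom_bound c h
  have key : ∀ n : Fin 127, rbkSep (Char.ofNat n.1).toUpper = rbkSep (Char.ofNat n.1) := by decide
  have := key ⟨c.toNat, hb⟩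
  simpa [Char.ofNat_toNat] using this

lemma dom_getD (a : List Char) (k : Nat) (hd : ∀ x ∈ a, pvDomChar x = true) :
    pvDomChar (a.getD k ' ') = true := by
  by_cases h : k < a.length
  · rw [List.getD_eq_getElem a ' ' h]; exact hd _ (a.getElem_mem h)
  · rw [List.getD_eq_default a ' ' (by omega)]; decide

lemma ech_dash (a : List Char) (k : Nat) (hd : ∀ x ∈ a, pvDomChar x = true) :
    (ech a k == '-') = (a.getD k ' ' == '-') := by
  unfold ech; split_ifs with h0 hs
  · subst h0; exact char_up_dash _ (dom_getD a 0 hd)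
  · exact char_up_dash _ (dom_getD a k hd)
  · rfl

lemma ech_sep (a : List Char) (k : Nat) (hd : ∀ x ∈ a, pvDomChar x = true) :
    rbkSep (ech a k) = rbkSep (a.getD k ' ') := by
  unfold ech; split_ifs with h0 hs
  · subst h0; exact char_up_sep _ (dom_getD a 0 hd)
  · exact char_up_sep _ (dom_getD a k hd)
  · rfl

-- the shared shape of the capitalization step on a state split at position k
lemma capStep_shape (P : List Char) (d' x : Char) (zs : List Char) (k : Nat) (hP : P.length = k) :
    (if ((P ++ d' :: x :: zs).getD k ' ' == ' ') || ((P ++ d' :: x :: zs).getD k ' ' == ',')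
        || ((P ++ d' :: x :: zs).getD k ' ' == '/') then
      (P ++ d' :: x :: zs).set (k + 1) (((P ++ d' :: x :: zs).getD (k + 1) ' ').toUpper)
    else P ++ d' :: x :: zs)
      = P ++ d' :: (if rbkSep d' then x.toUpper else x) :: zs := by
  subst hP
  have hmid : P ++ d' :: x :: zs = (P ++ [d']) ++ x :: zs := by simp
  have h1 : (P ++ d' :: x :: zs).getD P.length ' ' = d' := getD_len P d' (x :: zs) ' '
  have h2 : (P ++ d' :: x :: zs).getD (P.length + 1) ' ' = x := by
    rw [hmid]
    have := getD_len (P ++ [d']) x zs ' '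
    simpa using this
  have h3 : (P ++ d' :: x :: zs).set (P.length + 1) x.toUpper = P ++ d' :: x.toUpper :: zs := by
    rw [hmid]
    have := set_len (P ++ [d']) x x.toUpper zs
    simpa using this
  rw [h1, h2, h3]
  show (if rbkSep d' = true then _ else _) = _
  by_cases hs : rbkSep d' = true
  · rw [if_pos hs, if_pos hs]
  · rw [if_neg hs, if_neg hs]

-- ===== invariant for A's fused loop =====
lemma stepA_shape (a : List Char) (k : Nat) (hkn : k + 1 < a.length)
    (hd : ∀ x ∈ a, pvDomChar x = true) :
    rbkStepA ((List.range k).map (fch a) ++ ech a k :: a.drop (k + 1)) (k + 1)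
      = (List.range (k + 1)).map (fch a) ++ ech a (k + 1) :: a.drop (k + 2) := by
  have hP : ((List.range k).map (fch a)).length = k := by simp
  unfold rbkStepA
  dsimp only
  simp only [Nat.add_sub_cancel]
  have hget1 : ((List.range k).map (fch a) ++ ech a k :: a.drop (k + 1)).getD k ' ' = ech a k := by
    have := getD_len ((List.range k).map (fch a)) (ech a k) (a.drop (k + 1)) ' '
    rwa [hP] at this
  have hdrop : ((List.range k).map (fch a) ++ ech a k :: a.drop (k + 1)).drop (k + 1)
      = a.drop (k + 1) := by
    have := drop_len_succ ((List.range k).map (fch a)) (ech a k) (a.drop (k + 1))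
    rwa [hP] at this
  rw [hget1, hdrop]
  have hcond : ((ech a k == '-')
      && !(((a.drop (k + 1)).take 6).map Char.toLower == "et-al:".toList)
      && !(((a.drop (k + 1)).take 3).map Char.toLower == "al:".toList)) = dcond a k := by
    unfold dcond
    rw [ech_dash a k hd, decide_eq_true hkn]
    cases (a.getD k ' ' == '-') <;> simp
  rw [hcond]
  have hset : ((List.range k).map (fch a) ++ ech a k :: a.drop (k + 1)).set k '/'
      = (List.range k).map (fch a) ++ '/' :: a.drop (k + 1) := by
    have := set_len ((List.range k).map (fch a)) (ech a k) '/' (a.drop (k + 1))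
    rwa [hP] at this
  have hx : a.drop (k + 1) = a.getD (k + 1) ' ' :: a.drop (k + 2) := drop_cons_getD a (k + 1) hkn
  have hrhs : (List.range (k + 1)).map (fch a) ++ ech a (k + 1) :: a.drop (k + 2)
      = (List.range k).map (fch a) ++ fch a k :: ech a (k + 1) :: a.drop (k + 2) := by
    rw [List.range_succ, List.map_append]; simp
  by_cases hdc : dcond a k = true
  · rw [if_pos hdc, hset, hx, capStep_shape _ _ _ _ k hP, hrhs]
    have hf : fch a k = '/' := by
      have hd0 : dch a k = '/' := by simp [dch, hdc]
      unfold fch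
      split_ifs with h0 hs
      · subst h0; rw [hd0]; decide
      · rw [hd0]; decide
      · rw [hd0]
    have he : ech a (k + 1) = (a.getD (k + 1) ' ').toUpper := by
      simp [ech, dch, hdc, rbkSep]
    rw [hf, he]
    norm_num [rbkSep]
  · rw [if_neg hdc, hx, capStep_shape _ _ _ _ k hP, hrhs]
    have hdch : dch a k = a.getD k ' ' := by simp [dch, hdc]
    have hf : fch a k = ech a k := by
      unfold fch ech
      split_ifs with h0 hs
      · subst h0; rw [hdch]
      · rw [hdch]
      · rw [hdch]
    have hs : rbkSep (ech a k) = rbkSep (dch a k) := by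
      rw [ech_sep a k hd, hdch]
    have he : ech a (k + 1) = if rbkSep (dch a k) then (a.getD (k + 1) ' ').toUpper
        else a.getD (k + 1) ' ' := by
      simp [ech]
    rw [hs, hf, he]


lemma invA (a : List Char) (c : Char) (rest : List Char) (ha : a = c :: rest)
    (hd : ∀ x ∈ a, pvDomChar x = true) :
    ∀ k, k ≤ a.length - 1 →
      (List.range' 1 k).foldl rbkStepA (c.toUpper :: rest)
        = (List.range k).map (fch a) ++ ech a k :: a.drop (k + 1) := by
  intro k
  induction k with
  | zero =>
    intro _
    subst ha
    simp [ech, List.getD]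
  | succ k ih =>
    intro hk
    have hk' : k ≤ a.length - 1 := by omega
    have hkn : k + 1 < a.length := by subst ha; simp only [List.length_cons] at hk ⊢; omega
    rw [List.range'_concat, List.foldl_append, ih hk']
    simp only [List.foldl_cons, List.foldl_nil]
    have h1k : 1 + 1 * k = k + 1 := by omega
    rw [h1k]
    exact stepA_shape a k hkn hd

-- at the last position no dash conversion can fire
lemma dcond_last (a : List Char) (hne : a ≠ []) : dcond a (a.length - 1) = false := by
  unfold dcond
  have : ¬ (a.length - 1 + 1 < a.length) := by
    have := List.length_pos_iff.mpr hne; omega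
  simp [this]

lemma ech_last (a : List Char) (hne : a ≠ []) : ech a (a.length - 1) = fch a (a.length - 1) := by
  have hlast := dcond_last a hne
  by_cases h0 : a.length - 1 = 0
  · rw [h0] at hlast ⊢
    simp [ech, fch, dch, hlast]
  · simp [ech, fch, dch, hlast, h0]

-- both ports produce (range n).map (fch a)
lemma A_eq (key : String) (hd : ∀ x ∈ key.toList, pvDomChar x = true) (hne : key.toList ≠ []) :
    readableBibKey key = String.mk ((List.range key.toList.length).map (fch key.toList)) := by
  unfold readableBibKey
  obtain ⟨a, ha⟩ : ∃ l, key.toList = l := ⟨_, rfl⟩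
  rw [ha] at hd hne ⊢
  obtain ⟨c, rest, rfl⟩ : ∃ c rest, a = c :: rest := by
    cases a with
    | nil => exact absurd rfl hne
    | cons c rest => exact ⟨c, rest, rfl⟩
  dsimp only
  simp only [List.length_cons, Nat.add_sub_cancel]
  rw [invA (c :: rest) c rest rfl hd rest.length (by simp)]
  have hlast : rest.length = (c :: rest).length - 1 := by simp
  rw [hlast, ech_last (c :: rest) (by simp)]
  have hdropn : (c :: rest).drop ((c :: rest).length - 1 + 1) = [] := by simp
  rw [hdropn]
  congr 1
  conv_rhs => rw [show (c :: rest).length = ((c :: rest).length - 1) + 1 from by simp]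
  rw [List.range_succ, List.map_append]
  simp

-- B's per-index conversion is exactly dch
lemma conv_eq_dch (a : List Char) (j : Nat) : rbkConv a j = dch a j := by
  simp only [rbkConv, dch, dcond, List.map_drop, List.map_take]
  cases h1 : (a.getD j ' ' == '-' && decide (j + 1 < a.length)) <;>
    cases h2a : (((a.map Char.toLower).drop (j + 1)).take 6 == "et-al:".toList) <;>
    cases h2b : (((a.map Char.toLower).drop (j + 1)).take 3 == "al:".toList) <;>
    simp_all

lemma B_eq (key : String) :
    readableBibKey_alt key = String.mk ((List.range key.toList.length).map (fch key.toList)) := by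
  unfold readableBibKey_alt
  dsimp only
  congr 1
  apply List.map_congr_left
  intro j _
  rw [conv_eq_dch, conv_eq_dch]
  unfold fch
  by_cases h0 : j = 0
  · subst h0; simp
  · have hj : (j == 0) = false := by simp [h0]
    rw [if_neg h0, hj]
    unfold rbkSep
    cases hsep : (dch key.toList (j - 1) == ' ') || (dch key.toList (j - 1) == ',')
        || (dch key.toList (j - 1) == '/')
    · simp [hsep]
    · simp [hsep]

-- ===== VERDICT (by name: the statement is the Claim_ definition above) =====
theorem readableBibKey_spec : Claim_equal_readableBibKey := by
  intro key hdom hpre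
  have hne : key.toList ≠ [] := by
    intro h
    apply hpre
    simpa using h
  have hd : ∀ x ∈ key.toList, pvDomChar x = true := by
    have h := hdom
    unfold Dom_readableBibKey pvDomStr at h
    simpa [List.all_eq_true] using h
  unfold Spec_readableBibKey
  rw [A_eq key hd hne, B_eq key]
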